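-- pv_equiv track=rewrite | github.com/gossipauthorxpm/google-indexer | utils/SelectorAccount.py | __get_not_used_accounts
-- ===== SOURCE A (Python) =====
-- def __get_not_used_accounts(all_accounts, used_accounts):
--     for used_account in used_accounts:
--         try:
--             index = all_accounts.index(used_account)
--             all_accounts.pop(index)
--         except ValueError:
--             continue
--     return all_accounts
-- ===== SOURCE B (Python) =====
-- def __get_not_used_accounts(all_accounts, used_accounts):
--     budget = {}
--     for u in used_accounts:
--         budget[u] = budget.get(u, 0) + 1
--     survivors = []
--     for x in all_accounts:
--         if budget.get(x, 0) > 0: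
--             budget[x] = budget.get(x, 0) - 1
--         else:
--             survivors.append(x)
--     all_accounts[:] = survivors
--     return all_accounts
-- ===== Notes on version B (the rewrite author's own statement) =====
-- stated objective: faster
-- what changed: A repeatedly scans all_accounts with .index/.pop for each used account; B builds an occurrence-budget dict from used_accounts once and makes a single survivors pass over all_accounts, writing them back with slice assignment.
import Mathlib
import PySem

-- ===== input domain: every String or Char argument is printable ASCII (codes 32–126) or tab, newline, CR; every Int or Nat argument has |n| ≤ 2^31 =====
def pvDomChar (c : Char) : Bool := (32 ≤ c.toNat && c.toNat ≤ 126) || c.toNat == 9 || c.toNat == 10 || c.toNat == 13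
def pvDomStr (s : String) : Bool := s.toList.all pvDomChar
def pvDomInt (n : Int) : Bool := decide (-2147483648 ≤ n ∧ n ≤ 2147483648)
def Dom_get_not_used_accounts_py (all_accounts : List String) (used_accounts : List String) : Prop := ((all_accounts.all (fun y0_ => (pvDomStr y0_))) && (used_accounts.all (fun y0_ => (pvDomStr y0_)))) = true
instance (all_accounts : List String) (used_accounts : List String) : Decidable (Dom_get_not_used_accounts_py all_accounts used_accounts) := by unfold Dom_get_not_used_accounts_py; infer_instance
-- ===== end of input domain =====

-- B replaces A's per-used-account .index/.pop scans by one budget dict built from used_accounts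
-- plus a single survivors pass over all_accounts (objective: faster). Both A and B mutate
-- all_accounts in place in Python; the equivalence proved here is about the return value.

-- ===== PORT A =====
-- one step of A's loop body: try index = all_accounts.index(u); all_accounts.pop(index); except ValueError: continue
def pvRemoveOne (xs : List String) (u : String) : List String :=
  match PySem.List.index? xs u with
  | some i =>
      match PySem.List.pop? xs (i : Int) with
      | some r => r.2
      | none => xs   -- unreachable: i comes from index?
  | none => xs       -- ValueError: continue

def get_not_used_accounts_py (all_accounts : List String) (used_accounts : List String) : List String :=
  used_accounts.foldl pvRemoveOne all_accounts

-- ===== PORT B =====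
def get_not_used_accounts_py_alt (all_accounts : List String) (used_accounts : List String) : List String :=
  let budget : PySem.Dict String Int :=
    used_accounts.foldl (fun d u => d.insert u (d.getD u 0 + 1)) PySem.Dict.empty
  let final := all_accounts.foldl
    (fun (st : PySem.Dict String Int × List String) x =>
      if st.1.getD x 0 > 0 then (st.1.insert x (st.1.getD x 0 - 1), st.2)
      else (st.1, st.2 ++ [x]))
    (budget, [])
  final.2

-- ===== PRECONDITION & SPEC =====
def Spec_get_not_used_accounts_py (all_accounts : List String) (used_accounts : List String) (out : List String) : Prop := out = get_not_used_accounts_py_alt all_accounts used_accounts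
instance (all_accounts : List String) (used_accounts : List String) (out : List String) : Decidable (Spec_get_not_used_accounts_py all_accounts used_accounts out) := by unfold Spec_get_not_used_accounts_py; infer_instance

-- ===== CLAIM (what is proved, stated in full; the proofs are below) =====
def Claim_equal_get_not_used_accounts_py : Prop := ∀ (all_accounts : List String) (used_accounts : List String), Dom_get_not_used_accounts_py all_accounts used_accounts → Spec_get_not_used_accounts_py all_accounts used_accounts (get_not_used_accounts_py all_accounts used_accounts)

-- ===== LEMMAS AND PROOFS =====

-- abstract "budget pass": drop x while f x > 0 (decrementing), keep otherwise
def pvRunf (f : String → Int) : List String → List String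
  | [] => []
  | x :: xs => if 0 < f x then pvRunf (fun v => if v = x then f v - 1 else f v) xs
               else x :: pvRunf f xs

theorem pvRunf_congr (f g : String → Int) (xs : List String) (h : ∀ v, f v = g v) :
    pvRunf f xs = pvRunf g xs := by
  induction xs generalizing f g with
  | nil => rfl
  | cons x xs ih =>
      simp only [pvRunf, h x]
      split_ifs with hx
      · exact ih _ _ (fun v => by by_cases hv : v = x <;> simp [hv, h])
      · exact congrArg _ (ih _ _ h)

theorem pvRunf_zero (xs : List String) : pvRunf (fun _ => (0:Int)) xs = xs := by
  induction xs with
  | nil => rfl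
  | cons x xs ih => simp [pvRunf, ih]

theorem pvRemoveOne_eq_erase (xs : List String) (u : String) :
    pvRemoveOne xs u = xs.erase u := by
  induction xs with
  | nil => rfl
  | cons x xs ih =>
      by_cases hx : x = u
      · subst hx
        simp only [pvRemoveOne, PySem.List.index?_cons_self, Nat.cast_zero,
          PySem.List.pop?_zero_cons, List.erase_cons_head]
      · rw [List.erase_cons_tail (by simp [hx])]
        unfold pvRemoveOne
        rw [PySem.List.index?_cons_of_ne _ hx]
        cases hidx : PySem.List.index? xs u with
        | none =>
            simp only [Option.map_none]
            unfold pvRemoveOne at ih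
            rw [hidx] at ih
            exact congrArg (x :: ·) ih
        | some i =>
            obtain ⟨hk, _, _⟩ := PySem.List.getElem_of_index?_eq_some hidx
            simp only [Option.map_some]
            rw [PySem.List.pop?_natCast (x :: xs) (i + 1)
              (by simp only [List.length_cons]; omega)]
            unfold pvRemoveOne at ih
            simp only [hidx, PySem.List.pop?_natCast xs i hk] at ih
            show (x :: xs).eraseIdx (i + 1) = x :: xs.erase u
            rw [List.eraseIdx_cons_succ, ih]

-- bump the budget for u by one ⟷ erase the first occurrence of u first
theorem pvRunf_bump (xs : List String) (f : String → Int) (u : String) (hu : 0 ≤ f u) :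
    pvRunf (fun v => if v = u then f v + 1 else f v) xs = pvRunf f (xs.erase u) := by
  induction xs generalizing f with
  | nil => rfl
  | cons x xs ih =>
      by_cases hx : x = u
      · subst hx
        rw [List.erase_cons_head]
        simp only [pvRunf, ite_true]
        rw [if_pos (by omega)]
        exact pvRunf_congr _ _ xs (fun v => by by_cases hv : v = x <;> simp [hv])
      · rw [List.erase_cons_tail (by simp [hx])]
        simp only [pvRunf, if_neg hx]
        split_ifs with hfx
        · rw [← ih (fun v => if v = x then f v - 1 else f v)
              (show 0 ≤ if u = x then f u - 1 else f u from by
                rw [if_neg (Ne.symm hx)]; exact hu)]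
          refine pvRunf_congr _ _ xs (fun v => ?_)
          by_cases hv1 : v = u
          · by_cases hv2 : v = x
            · exact absurd (hv2 ▸ hv1) hx
            · simp [hv1, Ne.symm hx]
          · by_cases hv2 : v = x
            · simp [hv2, hx]
            · simp [hv1, hv2]
        · exact congrArg (x :: ·) (ih f hu)

-- A's whole loop computes the budget pass for the multiset of used_accounts
theorem foldl_removeOne_eq_runf (us : List String) (xs : List String) :
    us.foldl pvRemoveOne xs = pvRunf (fun v => (us.count v : Int)) xs := by
  induction us generalizing xs with
  | nil => simpa using (pvRunf_zero xs).symm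
  | cons u us ih =>
      simp only [List.foldl_cons]
      rw [ih (pvRemoveOne xs u), pvRemoveOne_eq_erase,
        ← pvRunf_bump xs (fun v => (us.count v : Int)) u (by positivity)]
      exact pvRunf_congr _ _ xs (fun v => by
        by_cases hv : v = u
        · subst hv; simp [List.count_cons_self]
        · simp [Ne.symm hv, hv])

-- B's survivors loop is the budget pass for its dict
theorem foldl_pass_eq_runf (xs : List String) (d : PySem.Dict String Int) (acc : List String) :
    (xs.foldl
      (fun (st : PySem.Dict String Int × List String) x =>
        if st.1.getD x 0 > 0 then (st.1.insert x (st.1.getD x 0 - 1), st.2)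
        else (st.1, st.2 ++ [x]))
      (d, acc)).2 = acc ++ pvRunf (fun v => d.getD v 0) xs := by
  induction xs generalizing d acc with
  | nil => simp [pvRunf]
  | cons x xs ih =>
      simp only [List.foldl_cons, pvRunf]
      split_ifs with hx
      · rw [ih]
        refine congrArg (acc ++ ·) (pvRunf_congr _ _ xs (fun v => ?_))
        rw [PySem.Dict.getD_insert]
        by_cases hv : v = x <;> simp [hv]
      · rw [ih]; simp

-- ===== VERDICT (by name: the statement is the Claim_ definition above) =====
theorem get_not_used_accounts_py_spec : Claim_equal_get_not_used_accounts_py := by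
  intro all used _
  show get_not_used_accounts_py all used = get_not_used_accounts_py_alt all used
  unfold get_not_used_accounts_py get_not_used_accounts_py_alt
  rw [foldl_removeOne_eq_runf, foldl_pass_eq_runf]
  simp only [List.nil_append]
  exact pvRunf_congr _ _ all (fun v => by
    rw [PySem.Dict.getD_foldl_insert_add_one]
    simp [PySem.Dict.getD_empty])
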